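-- pv_equiv track=rewrite | github.com/s2-t2/ada_lovelace_hackathon | app/ask_uppsala.py | ask_entertainment
-- ===== SOURCE A (Python) =====
-- def ask_entertainment(question):
--     info = "THIS QUESTION IS ABOUT ENTERTAINMENT"
--
--     ##### QUESTIONS
--     # How many nations are at UU?
--     keywords_q1 = ["how", "many", "nations", "nation", "uppsala", "university", "nation", "which", "are", "what"]
--     matches_q1 = 0
--
--     # How do I join a nation?
--     keywords_q2 = ["how", "join", "nation", "nations", "to"]
--     matches_q2 = 0
--
--     # How many theaters are in Uppsala ?
--     keywords_q3 = ["how", "many", "cinemas", "theaters", "bio"]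
--     matches_q3 = 0
--
--     # What is the best Japanese restaurant in the cit?
--     keywords_q4 = ["best", "japanese", "restaurant"]
--     matches_q4 = 0
--
--     # What time is systembolaget closed?
--     keywords_q5 = ["what", "time", "systembolaget", "colse", "close", "open", "oppening", "hours"]
--     matches_q5 = 0
--
--     for word in question:
--         for key in keywords_q1:
--             if word == key:
--                 matches_q1 += 1
--
--         for key in keywords_q2:
--             if word == key:
--                 matches_q2 += 1
--
--         for key in keywords_q3:
--             if word == key:
--                 matches_q3 += 1
--
--         for key in keywords_q4:
--             if word == key:
--                 matches_q4 += 1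
--
--         for key in keywords_q5:
--             if word == key:
--                 matches_q5 += 1
--
--     # ANSWERS
--
--     error_message = "Sorry, I didn't understand that! Try one more time! You can ask me about History" + \
--                     "of the University, Nations, Courses or Transportation. Or you can type '/help'"
--     answer_1 = "There are 13 different nations at Uppsala University: " + \
--                "Stockholms nation (1649)" + \
--                "-Uplands nation (1642) " + \
--                "-Gästrike-Hälsinge nation (1646)" + \
--                "-Östgöta nation (1646)" + \
--                "-Västgöta nation (1639) " + \
--                "-Södermanlands-Nerikes nation (1595) " + \
--                "-Västmanlands-Dala nation (1639) " + \
--                "-Smålands nation (1663) " + \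
--                "-Göteborgs nation (1667)" + \
--                "-Kalmar nation (1663) " + \
--                "-Värmlands nation (1660) " + \
--                "-Norrlands nation (1646) " + \
--                "-Gotlands nation (1663)"
--     answer_2 = "To join a nation you need to be a student at Uppsala University and pay a small fee of around 250 kr"
--     answer_3 = "There are 5 different cinemas in the city of Uppsala"
--     answer_4 = "The best Japanese restaurant in the city is Yukikos Sushi. The address is Sjukhusvägen, 5a"
--     answer_5 = "Systembolaget Opening hours are Mon-Fri 10AM-6PM and on Sat 10AM–3PM, Sun is closed all day, so don't forget to stash!"
--
--     # COMPARE COUNTER AND SEND TO RIGHT CLUSTER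
--     if (matches_q1 >= 2):
--         info = answer_1
--     elif (matches_q2 >= 2):
--         info = answer_2
--     elif (matches_q3 >= 2):
--         info = answer_3
--     elif (matches_q4 >= 2):
--         info = answer_4
--     elif (matches_q5 >= 2):
--         info = answer_5
--     else:
--         return error_message
--
--     return info
-- ===== SOURCE B (Python) =====
-- def ask_entertainment(question):
--     # one pass: frequency table of the question's words
--     counts = {}
--     for w in question:
--         counts[w] = counts.get(w, 0) + 1
--
--     def matches(keywords):
--         return sum(counts.get(k, 0) for k in keywords)
--
--     keywords_q1 = ["how", "many", "nations", "nation", "uppsala", "university", "nation", "which", "are", "what"]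
--     keywords_q2 = ["how", "join", "nation", "nations", "to"]
--     keywords_q3 = ["how", "many", "cinemas", "theaters", "bio"]
--     keywords_q4 = ["best", "japanese", "restaurant"]
--     keywords_q5 = ["what", "time", "systembolaget", "colse", "close", "open", "oppening", "hours"]
--
--     error_message = "Sorry, I didn't understand that! Try one more time! You can ask me about History" + \
--                     "of the University, Nations, Courses or Transportation. Or you can type '/help'"
--     answer_1 = "There are 13 different nations at Uppsala University: " + \
--                "Stockholms nation (1649)" + \
--                "-Uplands nation (1642) " + \
--                "-Gästrike-Hälsinge nation (1646)" + \
--                "-Östgöta nation (1646)" + \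
--                "-Västgöta nation (1639) " + \
--                "-Södermanlands-Nerikes nation (1595) " + \
--                "-Västmanlands-Dala nation (1639) " + \
--                "-Smålands nation (1663) " + \
--                "-Göteborgs nation (1667)" + \
--                "-Kalmar nation (1663) " + \
--                "-Värmlands nation (1660) " + \
--                "-Norrlands nation (1646) " + \
--                "-Gotlands nation (1663)"
--     answer_2 = "To join a nation you need to be a student at Uppsala University and pay a small fee of around 250 kr"
--     answer_3 = "There are 5 different cinemas in the city of Uppsala"
--     answer_4 = "The best Japanese restaurant in the city is Yukikos Sushi. The address is Sjukhusvägen, 5a"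
--     answer_5 = "Systembolaget Opening hours are Mon-Fri 10AM-6PM and on Sat 10AM–3PM, Sun is closed all day, so don't forget to stash!"
--
--     if matches(keywords_q1) >= 2:
--         return answer_1
--     elif matches(keywords_q2) >= 2:
--         return answer_2
--     elif matches(keywords_q3) >= 2:
--         return answer_3
--     elif matches(keywords_q4) >= 2:
--         return answer_4
--     elif matches(keywords_q5) >= 2:
--         return answer_5
--     else:
--         return error_message
-- ===== Notes on version B (the rewrite author's own statement) =====
-- stated objective: faster
-- what changed: B builds a word-frequency table of the question in one pass and scores each keyword list by table lookups, replacing A's per-word nested scan over all five keyword lists and its five running counters.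
import Mathlib
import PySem

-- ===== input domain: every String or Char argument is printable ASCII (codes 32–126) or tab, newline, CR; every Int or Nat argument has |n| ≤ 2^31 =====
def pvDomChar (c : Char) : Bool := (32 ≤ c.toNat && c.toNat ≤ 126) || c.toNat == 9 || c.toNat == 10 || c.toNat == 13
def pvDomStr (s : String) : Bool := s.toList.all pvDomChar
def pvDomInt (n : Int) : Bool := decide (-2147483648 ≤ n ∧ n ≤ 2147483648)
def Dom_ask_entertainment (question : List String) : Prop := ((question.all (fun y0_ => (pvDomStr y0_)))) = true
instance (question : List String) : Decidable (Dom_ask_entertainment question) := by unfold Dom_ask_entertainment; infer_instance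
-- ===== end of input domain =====

-- B scores keyword lists by lookups in a one-pass word-frequency table instead of A's
-- nested per-word scan over all five keyword lists (objective: simpler).


-- shared string constants (identical literals in both Pythons)
def pvKeywords_q1 : List String := ["how", "many", "nations", "nation", "uppsala", "university", "nation", "which", "are", "what"]
def pvKeywords_q2 : List String := ["how", "join", "nation", "nations", "to"]
def pvKeywords_q3 : List String := ["how", "many", "cinemas", "theaters", "bio"]
def pvKeywords_q4 : List String := ["best", "japanese", "restaurant"]
def pvKeywords_q5 : List String := ["what", "time", "systembolaget", "colse", "close", "open", "oppening", "hours"]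
def pvError : String := "Sorry, I didn't understand that! Try one more time! You can ask me about History" ++ "of the University, Nations, Courses or Transportation. Or you can type '/help'"
def pvAnswer_1 : String := "There are 13 different nations at Uppsala University: " ++ "Stockholms nation (1649)" ++ "-Uplands nation (1642) " ++ "-Gästrike-Hälsinge nation (1646)" ++ "-Östgöta nation (1646)" ++ "-Västgöta nation (1639) " ++ "-Södermanlands-Nerikes nation (1595) " ++ "-Västmanlands-Dala nation (1639) " ++ "-Smålands nation (1663) " ++ "-Göteborgs nation (1667)" ++ "-Kalmar nation (1663) " ++ "-Värmlands nation (1660) " ++ "-Norrlands nation (1646) " ++ "-Gotlands nation (1663)"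
def pvAnswer_2 : String := "To join a nation you need to be a student at Uppsala University and pay a small fee of around 250 kr"
def pvAnswer_3 : String := "There are 5 different cinemas in the city of Uppsala"
def pvAnswer_4 : String := "The best Japanese restaurant in the city is Yukikos Sushi. The address is Sjukhusvägen, 5a"
def pvAnswer_5 : String := "Systembolaget Opening hours are Mon-Fri 10AM-6PM and on Sat 10AM–3PM, Sun is closed all day, so don't forget to stash!"

-- ===== PORT A =====
-- one outer loop over the question, five running counters, inner scan of each keyword list
def ask_entertainment (question : List String) : String :=
  let ms : Int × Int × Int × Int × Int :=
    question.foldl (fun m word =>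
      (pvKeywords_q1.foldl (fun acc key => if word == key then acc + 1 else acc) m.1,
       pvKeywords_q2.foldl (fun acc key => if word == key then acc + 1 else acc) m.2.1,
       pvKeywords_q3.foldl (fun acc key => if word == key then acc + 1 else acc) m.2.2.1,
       pvKeywords_q4.foldl (fun acc key => if word == key then acc + 1 else acc) m.2.2.2.1,
       pvKeywords_q5.foldl (fun acc key => if word == key then acc + 1 else acc) m.2.2.2.2))
      (0, 0, 0, 0, 0)
  if ms.1 ≥ 2 then pvAnswer_1
  else if ms.2.1 ≥ 2 then pvAnswer_2
  else if ms.2.2.1 ≥ 2 then pvAnswer_3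
  else if ms.2.2.2.1 ≥ 2 then pvAnswer_4
  else if ms.2.2.2.2 ≥ 2 then pvAnswer_5
  else pvError

-- ===== PORT B =====
-- frequency table built in one pass; each keyword list is scored by table lookups
def ask_entertainment_alt (question : List String) : String :=
  let counts : PySem.Dict String Int :=
    question.foldl (fun d w => d.insert w (d.getD w 0 + 1)) PySem.Dict.empty
  let score : List String → Int :=
    fun keywords => keywords.foldl (fun acc k => acc + counts.getD k 0) 0
  if score pvKeywords_q1 ≥ 2 then pvAnswer_1
  else if score pvKeywords_q2 ≥ 2 then pvAnswer_2
  else if score pvKeywords_q3 ≥ 2 then pvAnswer_3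
  else if score pvKeywords_q4 ≥ 2 then pvAnswer_4
  else if score pvKeywords_q5 ≥ 2 then pvAnswer_5
  else pvError

-- ===== PRECONDITION & SPEC =====
def Spec_ask_entertainment (question : List String) (out : String) : Prop := out = ask_entertainment_alt question
instance (question : List String) (out : String) : Decidable (Spec_ask_entertainment question out) := by unfold Spec_ask_entertainment; infer_instance

-- ===== CLAIM (what is proved, stated in full; the proofs are below) =====
def Claim_equal_ask_entertainment : Prop := ∀ (question : List String), Dom_ask_entertainment question → Spec_ask_entertainment question (ask_entertainment question)

-- ===== LEMMAS AND PROOFS =====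

-- A's inner scan of a keyword list adds the number of occurrences of the word in the list
theorem pv_inner (w : String) (ks : List String) (m : Int) :
    ks.foldl (fun acc key => if w == key then acc + 1 else acc) m = m + (ks.count w : Int) := by
  induction ks generalizing m with
  | nil => simp
  | cons k ks ih =>
      simp only [List.foldl_cons]
      by_cases h : w = k
      · rw [if_pos (by simp [h]), ih, List.count_cons]
        simp [h]; ring
      · rw [if_neg (by simp [h]), ih, List.count_cons]
        simp [Ne.symm h]

def pvS (ks q : List String) : Int := (q.map (fun w => (ks.count w : Int))).sum

-- a 0/1 indicator sum over the question is a count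
theorem pv_sum_ind (k : String) (q : List String) :
    (q.map (fun w => if w == k then (1 : Int) else 0)).sum = (q.count k : Int) := by
  induction q with
  | nil => simp
  | cons w q ihq =>
      simp only [List.map_cons, List.sum_cons, List.count_cons, ihq]
      by_cases h : w = k
      · simp [h]; ring
      · simp [h]

-- peeling one keyword off pvS
theorem pv_split (k : String) (ks q : List String) :
    pvS (k :: ks) q = (q.map (fun w => if w == k then (1 : Int) else 0)).sum + pvS ks q := by
  induction q with
  | nil => simp [pvS]
  | cons w q ihq =>
      simp only [pvS, List.map_cons, List.sum_cons] at ihq ⊢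
      rw [ihq, List.count_cons]
      push_cast
      by_cases h : w = k
      · simp [h]; ring
      · simp [h, Ne.symm h]; ring

-- A's outer loop, component-wise
theorem pv_outer (q : List String) (a b c d e : Int) :
    q.foldl (fun m word =>
      (pvKeywords_q1.foldl (fun acc key => if word == key then acc + 1 else acc) m.1,
       pvKeywords_q2.foldl (fun acc key => if word == key then acc + 1 else acc) m.2.1,
       pvKeywords_q3.foldl (fun acc key => if word == key then acc + 1 else acc) m.2.2.1,
       pvKeywords_q4.foldl (fun acc key => if word == key then acc + 1 else acc) m.2.2.2.1,
       pvKeywords_q5.foldl (fun acc key => if word == key then acc + 1 else acc) m.2.2.2.2))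
      ((a, b, c, d, e) : Int × Int × Int × Int × Int)
    = (a + pvS pvKeywords_q1 q, b + pvS pvKeywords_q2 q, c + pvS pvKeywords_q3 q,
       d + pvS pvKeywords_q4 q, e + pvS pvKeywords_q5 q) := by
  induction q generalizing a b c d e with
  | nil => simp [pvS]
  | cons w q ih =>
      rw [List.foldl_cons, pv_inner, pv_inner, pv_inner, pv_inner, pv_inner, ih]
      simp only [pvS, List.map_cons, List.sum_cons, Prod.mk.injEq]
      refine ⟨by ring, by ring, by ring, by ring, by ring⟩

-- double counting: summing keyword-hits per word equals summing word-counts per keyword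
theorem pv_swap (ks q : List String) :
    pvS ks q = (ks.map (fun k => (q.count k : Int))).sum := by
  induction ks with
  | nil => simp [pvS]
  | cons k ks ih =>
      rw [pv_split, pv_sum_ind, ih]
      simp

-- B's score of a keyword list
theorem pv_bmatch (q ks : List String) :
    ks.foldl (fun acc k =>
        acc + (q.foldl (fun d w => d.insert w (d.getD w 0 + 1)) PySem.Dict.empty).getD k 0) (0 : Int)
    = (ks.map (fun k => (q.count k : Int))).sum := by
  rw [PySem.List.foldl_add]
  simp [PySem.Dict.getD_foldl_insert_add_one]

-- ===== VERDICT (by name: the statement is the Claim_ definition above) =====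
theorem ask_entertainment_spec : Claim_equal_ask_entertainment := by
  intro q _
  unfold Spec_ask_entertainment ask_entertainment ask_entertainment_alt
  simp only [pv_outer, pv_bmatch, pv_swap, zero_add]
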